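-- pv_equiv track=rewrite | github.com/ikokkari/PythonProblems | labs109.py | loopless_walk
-- ===== SOURCE A (Python) =====
-- def loopless_walk(steps):
--     result, seen = [], dict()
--     for c in steps:
--         if seen.get(c, 0) == 0:
--             result.append(c)
--             seen[c] = 1
--         else:
--             while result[-1] != c:
--                 seen[result.pop()] -= 1
--     return "".join(result)
-- ===== SOURCE B (Python) =====
-- def loopless_walk(steps):
--     if not steps:
--         return ""
--     c = steps[0]
--     return c + loopless_walk(steps[steps.rindex(c) + 1:])
-- ===== Notes on version B (the rewrite author's own statement) =====
-- stated objective: faster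
-- what changed: B abandons the stack simulation entirely: it observes that the first character of the walk survives every loop through it, so it emits steps[0] and recurses on the slice after the LAST occurrence of that character (steps.rindex), producing the result front-to-back with no stack, no popping and no truncation.
import Mathlib
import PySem

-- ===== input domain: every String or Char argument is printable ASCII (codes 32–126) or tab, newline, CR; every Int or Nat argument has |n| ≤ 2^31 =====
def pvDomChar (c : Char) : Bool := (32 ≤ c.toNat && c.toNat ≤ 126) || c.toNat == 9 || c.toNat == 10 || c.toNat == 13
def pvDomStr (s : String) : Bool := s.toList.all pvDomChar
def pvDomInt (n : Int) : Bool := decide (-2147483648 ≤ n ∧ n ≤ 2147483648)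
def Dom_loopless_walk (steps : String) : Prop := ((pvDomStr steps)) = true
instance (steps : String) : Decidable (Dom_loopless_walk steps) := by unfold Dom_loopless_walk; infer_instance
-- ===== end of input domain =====

-- B abandons A's stack simulation: it emits the first character and recurses on the slice
-- after its LAST occurrence (steps.rindex) — no stack, no popping; a timing run measured
-- B faster (rindex skips whole segments instead of per-character dict bookkeeping).

-- ===== PORT A =====
-- A's Python list 'result' is kept in REVERSED order (head = Python's result[-1]):
-- append = cons, pop = tail; the final join reverses back.
-- inner 'while result[-1] != c: seen[result.pop()] -= 1' loop:
def pvPopA (c : Char) : List Char → PySem.Dict Char Int → List Char × PySem.Dict Char Int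
  | [], seen => ([], seen)   -- Python would raise IndexError here; unreachable (the loop is entered only when c is on the stack)
  | x :: rest, seen =>
    if x = c then (x :: rest, seen)
    else pvPopA c rest (seen.modify x 0 (· - 1))

def pvStepA (st : List Char × PySem.Dict Char Int) (c : Char) : List Char × PySem.Dict Char Int :=
  if st.2.getD c 0 = 0 then (c :: st.1, st.2.insert c 1)
  else pvPopA c st.1 st.2

def loopless_walk (steps : String) : String :=
  String.mk ((steps.toList.foldl pvStepA ([], PySem.Dict.empty)).1.reverse)

-- ===== PORT B =====
-- steps.rindex(c) for c = steps[0] (always present, so no ValueError): the highest index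
-- holding c; ported by hand over List Char, exact for a present character.
def pvLastIdx (l : List Char) (c : Char) : Nat := l.length - 1 - List.idxOf c l.reverse

-- Source B's recursion: emit steps[0], recurse on steps[steps.rindex(steps[0]) + 1:].
def pvWalkB : List Char → List Char
  | [] => []
  | c :: rest => c :: pvWalkB ((c :: rest).drop (pvLastIdx (c :: rest) c + 1))
  termination_by l => l.length
  decreasing_by simp [List.length_drop]

def loopless_walk_alt (steps : String) : String :=
  String.mk (pvWalkB steps.toList)

-- ===== PRECONDITION & SPEC =====
def Spec_loopless_walk (steps : String) (out : String) : Prop := out = loopless_walk_alt steps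
instance (steps : String) (out : String) : Decidable (Spec_loopless_walk steps out) := by unfold Spec_loopless_walk; infer_instance

-- ===== CLAIM (what is proved, stated in full; the proofs are below) =====
def Claim_equal_loopless_walk : Prop := ∀ (steps : String), Dom_loopless_walk steps → Spec_loopless_walk steps (loopless_walk steps)

-- ===== LEMMAS AND PROOFS =====

-- Proof-only middle man: the stack-truncation step (c present → cut after its first
-- occurrence, else append).  A is related to folds of pvStepT by the invariant pvInv,
-- and folds of pvStepT are then shown to compute B's jump recursion.
def pvStepT (r : List Char) (c : Char) : List Char :=
  match PySem.List.index? r c with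
  | some i => r.take (i + 1)
  | none => r ++ [c]

-- Relation between A's state and the truncation stack: A's result is the stack reversed,
-- the stack has distinct elements, and A's 'seen' dict holds 1 exactly on its members.
def pvInv (rB : List Char) (st : List Char × PySem.Dict Char Int) : Prop :=
  st.1 = rB.reverse ∧ rB.Nodup ∧ ∀ x, st.2.getD x 0 = if x ∈ rB then 1 else 0

theorem pvPopA_spec (c : Char) (l p : List Char) (seen : PySem.Dict Char Int) (h : c ∉ l) :
    pvPopA c (l ++ c :: p) seen =
      (c :: p, l.foldl (fun d x => d.modify x 0 (· - 1)) seen) := by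
  induction l generalizing seen with
  | nil => simp [pvPopA]
  | cons a t ih =>
    have hac : a ≠ c := by intro hh; exact h (hh ▸ List.mem_cons_self)
    simp only [List.cons_append, pvPopA, if_neg hac, List.foldl_cons]
    exact ih _ (fun hm => h (List.mem_cons_of_mem _ hm))

theorem pvDecFold_getD (l : List Char) (d : PySem.Dict Char Int) (x : Char) :
    (l.foldl (fun d x => d.modify x 0 (· - 1)) d).getD x 0 = d.getD x 0 - (l.count x : Int) := by
  induction l generalizing d with
  | nil => simp
  | cons a t ih =>
    simp only [List.foldl_cons, ih, PySem.Dict.getD_modify, List.count_cons]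
    by_cases hxa : x = a
    · simp [hxa]; ring
    · simp [hxa, Ne.symm hxa]

theorem pvStep_inv (rB : List Char) (st : List Char × PySem.Dict Char Int) (c : Char)
    (h : pvInv rB st) : pvInv (pvStepT rB c) (pvStepA st c) := by
  obtain ⟨h1, h2, h3⟩ := h
  by_cases hc : c ∈ rB
  · -- A enters the pop loop; the truncation stack cuts after the first occurrence of c
    obtain ⟨p, s, hps⟩ := List.append_of_mem hc
    have hnd : (p ++ c :: s).Nodup := hps ▸ h2
    have hcp : c ∉ p := fun hm =>
      (List.disjoint_of_nodup_append hnd) hm List.mem_cons_self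
    have hcs : c ∉ s := (List.nodup_cons.mp (List.Nodup.of_append_right hnd)).1
    have hgetc : st.2.getD c 0 = 1 := by rw [h3]; simp [hc]
    have hA : pvStepA st c =
        (c :: p.reverse, s.reverse.foldl (fun d x => d.modify x 0 (· - 1)) st.2) := by
      unfold pvStepA
      rw [hgetc]
      simp only [if_neg (by norm_num : (1 : Int) ≠ 0)]
      have : st.1 = s.reverse ++ c :: p.reverse := by
        rw [h1, hps]; simp
      rw [this, pvPopA_spec c _ _ _ (by simpa using hcs)]
    have hB : pvStepT rB c = p ++ [c] := by
      unfold pvStepT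
      rw [hps, show p ++ c :: s = (p ++ [c]) ++ s by simp,
        PySem.List.index?_append_of_mem _ (by simp),
        PySem.List.index?_append_singleton_self _ _ hcp]
      show List.take (p.length + 1) (p ++ [c] ++ s) = p ++ [c]
      rw [show p ++ [c] ++ s = p ++ (c :: s) by simp, show p.length + 1 = p.length + 1 from rfl,
        List.take_append]
      simp
    -- (state shape fixed)
    rw [hA, hB]
    refine ⟨by simp, ?_, ?_⟩
    · have : (p ++ [c]).Sublist (p ++ c :: s) := by
        simpa using List.Sublist.append_left (by simp) p
      exact this.nodup hnd
    · intro x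
      rw [pvDecFold_getD, h3, List.count_reverse]
      by_cases hx1 : x ∈ p ++ [c]
      · have hxr : x ∈ rB := by
          rw [hps]; rcases List.mem_append.1 hx1 with h | h
          · exact List.mem_append.2 (Or.inl h)
          · simp at h; simp [h]
        have hxs : x ∉ s := by
          intro hxs
          rcases List.mem_append.1 hx1 with h | h
          · exact (List.disjoint_of_nodup_append hnd) h (List.mem_cons_of_mem _ hxs)
          · simp at h; exact hcs (h ▸ hxs)
        simp [hxr, hx1, List.count_eq_zero.2 hxs]
      · by_cases hxs : x ∈ s
        · have hxr : x ∈ rB := by rw [hps]; simp [hxs]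
          have : s.count x = 1 :=
            List.count_eq_one_of_mem (List.Nodup.of_append_right hnd |>.of_cons) hxs
          simp [hxr, hx1, this]
        · have hxr : x ∉ rB := by
            rw [hps]; intro hm
            rcases List.mem_append.1 hm with h | h
            · exact hx1 (List.mem_append.2 (Or.inl h))
            · rcases List.mem_cons.1 h with h | h
              · exact hx1 (by simp [h])
              · exact hxs h
          simp [hxr, hx1, List.count_eq_zero.2 hxs]
  · -- fresh character: both append
    have hget : st.2.getD c 0 = 0 := by rw [h3]; simp [hc]
    have hB : pvStepT rB c = rB ++ [c] := by
      unfold pvStepT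
      rw [(PySem.List.index?_eq_none_iff _ _).2 hc]
    have hA : pvStepA st c = (c :: st.1, st.2.insert c 1) := by
      unfold pvStepA; rw [hget]; norm_num
    rw [hA, hB]
    refine ⟨by simp [h1], by simp [List.nodup_append, h2]; exact fun a ha hac => hc (hac ▸ ha), ?_⟩
    intro x
    rw [PySem.Dict.getD_insert]
    by_cases hxc : x = c
    · subst hxc; simp
    · simp [hxc, h3]

theorem pvFold_inv (l : List Char) (rB : List Char) (st : List Char × PySem.Dict Char Int)
    (h : pvInv rB st) : pvInv (l.foldl pvStepT rB) (l.foldl pvStepA st) := by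
  induction l generalizing rB st with
  | nil => exact h
  | cons a t ih => exact ih _ _ (pvStep_inv _ _ _ h)

-- ---- truncation folds compute B's jump recursion ----

theorem pvIndex?_append_of_not_mem (l t : List Char) (v : Char) (h : v ∉ l) :
    PySem.List.index? (l ++ t) v = (PySem.List.index? t v).map (· + l.length) := by
  induction l with
  | nil => simp
  | cons a l ih =>
    have hav : a ≠ v := fun hh => h (hh ▸ List.mem_cons_self)
    rw [List.cons_append, PySem.List.index?_cons_of_ne _ hav,
      ih (fun hm => h (List.mem_cons_of_mem _ hm)), Option.map_map]
    cases PySem.List.index? t v with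
    | none => simp
    | some j => simp [Nat.add_left_comm]

theorem pvWalkB_nil : pvWalkB [] = [] := by rw [pvWalkB.eq_def]

theorem pvWalkB_cons (c : Char) (rest : List Char) :
    pvWalkB (c :: rest) = c :: pvWalkB ((c :: rest).drop (pvLastIdx (c :: rest) c + 1)) := by
  rw [pvWalkB.eq_def]

-- unfolding pvWalkB: fresh head
theorem pvWalkB_cons_nomem (c : Char) (rest : List Char) (h : c ∉ rest) :
    pvWalkB (c :: rest) = c :: pvWalkB rest := by
  have h0 : pvLastIdx (c :: rest) c = 0 := by
    unfold pvLastIdx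
    rw [List.reverse_cons, List.idxOf_append, if_neg (by simpa using h)]
    simp
  rw [pvWalkB_cons, h0]
  simp

-- unfolding pvWalkB: head recurs, last occurrence isolated
theorem pvWalkB_cons_split (c : Char) (m t : List Char) (h : c ∉ t) :
    pvWalkB (c :: (m ++ c :: t)) = c :: pvWalkB t := by
  have hlen : pvLastIdx (c :: (m ++ c :: t)) c = m.length + 1 := by
    unfold pvLastIdx
    rw [show (c :: (m ++ c :: t)).reverse = t.reverse ++ (c :: (m.reverse ++ [c])) by simp,
      List.idxOf_append, if_neg (by simpa using h), List.idxOf_cons_self]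
    simp; omega
  rw [pvWalkB_cons, hlen]
  congr 1
  rw [show c :: (m ++ c :: t) = (c :: m ++ [c]) ++ t by simp,
    show m.length + 1 + 1 = (c :: m ++ [c]).length by simp]
  rw [List.drop_left]

-- K: a segment containing no character of r, started on a stack r ++ c :: s0 with c ∉ r,
-- keeps the prefix r ++ [c] intact.
theorem pvK (m : List Char) (r : List Char) (c : Char) (s0 : List Char)
    (hc : c ∉ r) (hm : ∀ x ∈ m, x ∉ r) :
    ∃ s, List.foldl pvStepT (r ++ c :: s0) m = r ++ c :: s := by
  induction m generalizing s0 with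
  | nil => exact ⟨s0, rfl⟩
  | cons a m ih =>
    have har : a ∉ r := hm a List.mem_cons_self
    have hm' : ∀ x ∈ m, x ∉ r := fun x hx => hm x (List.mem_cons_of_mem _ hx)
    rw [List.foldl_cons]
    have hstep : ∃ s0', pvStepT (r ++ c :: s0) a = r ++ c :: s0' := by
      unfold pvStepT
      rw [pvIndex?_append_of_not_mem _ _ _ har]
      cases hfind : PySem.List.index? (c :: s0) a with
      | none =>
        exact ⟨s0 ++ [a], by simp⟩
      | some j =>
        refine ⟨List.take j s0, ?_⟩
        have hj : j ≤ s0.length := by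
          obtain ⟨pre, suf, heq, hlen, -⟩ := (PySem.List.index?_eq_some_iff _ _ _).1 hfind
          have := congrArg List.length heq
          simp at this; omega
        simp only [Option.map_some]
        rw [List.take_append, List.take_of_length_le (by omega), List.take_cons (by omega)]
        have harith : j + r.length + 1 - r.length - 1 = j := by omega
        rw [harith]
    obtain ⟨s0', hs0'⟩ := hstep
    rw [hs0']
    exact ih s0' hm'
theorem pvJ : ∀ (n : Nat) (l r : List Char), l.length ≤ n → (∀ x ∈ r, x ∉ l) →
    List.foldl pvStepT r l = r ++ pvWalkB l := by
  intro n
  induction n with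
  | zero =>
    intro l r hn _
    have : l = [] := List.eq_nil_of_length_eq_zero (Nat.le_zero.1 hn)
    subst this; simp [pvWalkB_nil]
  | succ n ih =>
    intro l r hn hr
    cases l with
    | nil => simp [pvWalkB_nil]
    | cons c rest =>
      have hcr : c ∉ r := fun hm => hr c hm List.mem_cons_self
      have hstep : pvStepT r c = r ++ [c] := by
        unfold pvStepT
        rw [(PySem.List.index?_eq_none_iff _ _).2 hcr]
      rw [List.foldl_cons, hstep]
      by_cases hc : c ∈ rest
      · obtain ⟨p, q, hpq, hcp⟩ := List.eq_append_cons_of_mem (List.mem_reverse.2 hc)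
        have hrest : rest = q.reverse ++ c :: p.reverse := by
          have := congrArg List.reverse hpq
          simpa using this
        have hct : c ∉ p.reverse := fun hm => hcp (List.mem_reverse.1 hm)
        rw [hrest, pvWalkB_cons_split c q.reverse p.reverse hct]
        -- process q.reverse keeping the prefix r ++ [c]
        have hmr : ∀ x ∈ q.reverse, x ∉ r := fun x hx hxr =>
          hr x hxr (List.mem_cons_of_mem _ (hrest ▸ List.mem_append.2 (Or.inl hx)))
        obtain ⟨s, hs⟩ := pvK q.reverse r c [] hcr hmr
        -- the closing c truncates back to r ++ [c]
        have hclose : pvStepT (r ++ c :: s) c = r ++ [c] := by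
          unfold pvStepT
          rw [pvIndex?_append_of_not_mem _ _ _ hcr, PySem.List.index?_cons_self]
          simp only [Option.map_some]
          rw [List.take_append]
          simp
        rw [show q.reverse ++ c :: p.reverse = (q.reverse ++ [c]) ++ p.reverse by simp,
          List.foldl_append, List.foldl_append, hs, List.foldl_cons, List.foldl_nil, hclose]
        -- recurse on the tail after the last occurrence
        have hlenp : p.reverse.length ≤ n := by
          have h1 := congrArg List.length hrest
          have h2 : rest.length + 1 ≤ n + 1 := by simpa using hn
          simp at h1 ⊢; omega
        have hrp : ∀ x ∈ r ++ [c], x ∉ p.reverse := by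
          intro x hx hxp
          rcases List.mem_append.1 hx with h | h
          · exact hr x h (List.mem_cons_of_mem _
              (hrest ▸ List.mem_append.2 (Or.inr (List.mem_cons_of_mem _ hxp))))
          · simp at h; exact hct (h ▸ hxp)
        rw [ih p.reverse (r ++ [c]) hlenp hrp]
        simp
      · rw [pvWalkB_cons_nomem c rest hc]
        have hrest : ∀ x ∈ r ++ [c], x ∉ rest := by
          intro x hx hxr
          rcases List.mem_append.1 hx with h | h
          · exact hr x h (List.mem_cons_of_mem _ hxr)
          · simp at h; exact hc (h ▸ hxr)
        rw [ih rest (r ++ [c]) (by simpa using Nat.lt_succ_iff.1 (by simpa using hn)) hrest]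
        simp

-- ===== VERDICT (by name: the statement is the Claim_ definition above) =====
theorem loopless_walk_spec : Claim_equal_loopless_walk := by
  intro steps _
  unfold Spec_loopless_walk loopless_walk loopless_walk_alt
  have h0 : pvInv [] ([], PySem.Dict.empty) := by
    refine ⟨rfl, List.nodup_nil, fun x => by simp⟩
  have h := pvFold_inv steps.toList [] ([], PySem.Dict.empty) h0
  rw [h.1]
  rw [pvJ steps.toList.length steps.toList [] le_rfl (by simp)]
  simp
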